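-- pv_equiv track=rewrite | github.com/Diabolocom-Research/ConversationalDataset | src/transcript_processing/utils_preprocess.py | space_text_for_preprocess
-- ===== SOURCE A (Python) =====
-- def replace_dict_substr(text, replace_dict):
-- 	"""
-- 	Replace substrings according to replace_dict
-- 	"""
-- 	for k, v in replace_dict.items():
-- 		text = text.replace(k, v)
-- 	return text
--
-- def space_text_for_preprocess(text):
-- 	"""
-- 	Return a space formated string for preprocessing
-- 		Only one space between characters ex: " there is only one space "
-- 		Startswith " " , endswith " " ex : ' hello '
-- 		Punctuation with space before and after ex : ' . ', ' ? ', ' ! '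
-- 	Return:
-- 		text (str)
-- 		ex: ' This is a p0sSiBle return , because this FoRmaT sp@ces '
-- 	"""
-- 	text = " ".join(text.split())
-- 	text = " " + text + " "
-- 	replace_dict = {}
-- 	punct_list = "!?.,;"
-- 	for p in punct_list:
-- 		replace_dict[p] = f" {p} "
-- 	text = replace_dict_substr(text, replace_dict)
-- 	return text
-- ===== SOURCE B (Python) =====
-- def space_text_for_preprocess(text):
-- 	"""
-- 	Normalize whitespace and pad punctuation in one character pass.
-- 	"""
-- 	text = " ".join(text.split())
-- 	text = " " + text + " "
-- 	return "".join(" " + c + " " if c in "!?.,;" else c for c in text)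
-- ===== Notes on version B (the rewrite author's own statement) =====
-- stated objective: simpler
-- what changed: Replaced the replace_dict helper and its five sequential full-string str.replace passes with a single character-level pass that pads each punctuation character as it is emitted.
import Mathlib
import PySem

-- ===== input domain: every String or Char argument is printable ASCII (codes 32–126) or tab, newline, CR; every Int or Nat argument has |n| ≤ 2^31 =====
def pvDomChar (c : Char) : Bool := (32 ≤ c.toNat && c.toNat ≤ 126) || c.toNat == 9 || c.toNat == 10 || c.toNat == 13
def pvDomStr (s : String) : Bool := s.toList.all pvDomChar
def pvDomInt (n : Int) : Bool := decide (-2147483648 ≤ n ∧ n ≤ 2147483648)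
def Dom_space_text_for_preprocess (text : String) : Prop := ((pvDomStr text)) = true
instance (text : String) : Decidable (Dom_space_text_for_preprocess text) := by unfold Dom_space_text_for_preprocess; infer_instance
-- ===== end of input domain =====

-- B replaces A's five sequential full-string replaces with a single character pass; objective: simpler/idiomatic.

-- ===== PORT A =====
-- helper: for k, v in replace_dict.items(): text = text.replace(k, v)
def replace_dict_substr (text : String) (replace_dict : PySem.Dict String String) : String :=
  (PySem.Dict.items replace_dict).foldl (fun t kv => PySem.Str.replace t kv.1 kv.2) text

def space_text_for_preprocess (text : String) : String :=
  let text := PySem.Str.join " " (PySem.Str.split₀ text)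
  -- " " + text + " " : string concatenation, exact on code points
  let text := String.ofList (' ' :: text.toList ++ [' '])
  let replace_dict :=
    ("!?.,;".toList).foldl
      (fun d p => PySem.Dict.insert d (String.ofList [p]) (String.ofList [' ', p, ' '])) PySem.Dict.empty
  replace_dict_substr text replace_dict

-- ===== PORT B =====
def space_text_for_preprocess_alt (text : String) : String :=
  let text := PySem.Str.join " " (PySem.Str.split₀ text)
  let text := String.ofList (' ' :: text.toList ++ [' '])
  String.ofList (text.toList.flatMap (fun c => if c ∈ "!?.,;".toList then [' ', c, ' '] else [c]))

-- ===== PRECONDITION & SPEC =====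
def Spec_space_text_for_preprocess (text : String) (out : String) : Prop := out = space_text_for_preprocess_alt text
instance (text : String) (out : String) : Decidable (Spec_space_text_for_preprocess text out) := by unfold Spec_space_text_for_preprocess; infer_instance

-- ===== CLAIM (what is proved, stated in full; the proofs are below) =====
def Claim_equal_space_text_for_preprocess : Prop := ∀ (text : String), Dom_space_text_for_preprocess text → Spec_space_text_for_preprocess text (space_text_for_preprocess text)

-- ===== LEMMAS AND PROOFS =====

-- single-character replace is a per-character expansion
theorem replace_single (p : Char) (new : List Char) (cs : List Char) :
    PySem.Chars.replace cs [p] new = cs.flatMap (fun c => if c = p then new else [c]) := by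
  have go : ∀ (cs : List Char) (fuel : Nat) (acc : List Char), cs.length ≤ fuel →
      PySem.Chars.replace.go [p] new fuel cs acc
        = acc.reverse ++ cs.flatMap (fun c => if c = p then new else [c]) := by
    intro cs
    induction cs with
    | nil =>
      intro fuel acc h
      cases fuel <;> rw [PySem.Chars.replace.go.eq_def] <;> simp
    | cons c t ih =>
      intro fuel acc h
      cases fuel with
      | zero => simp at h
      | succ f =>
        rw [PySem.Chars.replace.go.eq_def]
        by_cases hc : c = p
        · subst hc
          simp [List.isPrefixOf, ih f (new.reverse ++ acc) (by simpa using h)]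
        · have hc' : ¬ p = c := fun h => hc h.symm
          simp [List.isPrefixOf, hc, hc', ih f (c :: acc) (by simpa using h)]
  simp [PySem.Chars.replace, go cs cs.length [] le_rfl]

-- folding per-character expansions over fresh characters collapses to one pass
theorem foldl_expand (ps : List Char) (hs : ' ' ∉ ps) (hn : ps.Nodup) :
    ∀ (cs : List Char),
      ps.foldl (fun acc p => acc.flatMap (fun c => if c = p then [' ', p, ' '] else [c])) cs
        = cs.flatMap (fun c => if c ∈ ps then [' ', c, ' '] else [c]) := by
  induction ps with
  | nil => intro cs; simp
  | cons p ps ih =>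
    intro cs
    have hs' : ' ' ∉ ps := fun h => hs (List.mem_cons_of_mem _ h)
    have hp : p ∉ ps := (List.nodup_cons.mp hn).1
    have hassoc : ∀ (l : List Char) (f g : Char → List Char),
        (l.flatMap f).flatMap g = l.flatMap (fun x => (f x).flatMap g) := by
      intro l f g; induction l with
      | nil => simp
      | cons a t ihl => simp [ihl]
    rw [List.foldl_cons, ih hs' (List.nodup_cons.mp hn).2, hassoc]
    apply List.flatMap_congr
    intro c _
    by_cases hc : c = p
    · subst hc
      simp [hp, hs']
    · by_cases hm : c ∈ ps <;> simp [hc, hm]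
  
-- ===== VERDICT (by name: the statement is the Claim_ definition above) =====
theorem space_text_for_preprocess_spec : Claim_equal_space_text_for_preprocess := by
  unfold Claim_equal_space_text_for_preprocess
  intro text _
  show space_text_for_preprocess text = space_text_for_preprocess_alt text
  simp only [space_text_for_preprocess, space_text_for_preprocess_alt]
  set m : List Char := ' ' :: (PySem.Str.join " " (PySem.Str.split₀ text)).toList ++ [' '] with hm
  have hps : ("!?.,;".toList) = ['!', '?', '.', ',', ';'] := by decide
  rw [hps]
  have hitems : (PySem.Dict.items
      (List.foldl (fun d p => PySem.Dict.insert d (String.ofList [p]) (String.ofList [' ', p, ' ']))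
        PySem.Dict.empty ['!', '?', '.', ',', ';'])) =
      [(String.ofList ['!'], String.ofList [' ', '!', ' ']),
       (String.ofList ['?'], String.ofList [' ', '?', ' ']),
       (String.ofList ['.'], String.ofList [' ', '.', ' ']),
       (String.ofList [','], String.ofList [' ', ',', ' ']),
       (String.ofList [';'], String.ofList [' ', ';', ' '])] := by decide
  have hA : replace_dict_substr (String.ofList m)
      (List.foldl (fun d p => PySem.Dict.insert d (String.ofList [p]) (String.ofList [' ', p, ' ']))
        PySem.Dict.empty ['!', '?', '.', ',', ';'])
      = String.ofList ((['!', '?', '.', ',', ';'] : List Char).foldl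
          (fun acc p => acc.flatMap (fun c => if c = p then [' ', p, ' '] else [c])) m) := by
    rw [← String.toList_inj]
    simp only [replace_dict_substr]
    rw [hitems]
    simp only [List.foldl]
    simp [replace_single]
  rw [hA, foldl_expand ['!', '?', '.', ',', ';'] (by decide) (by decide) m]
  simp
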